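-- pv_equiv track=rewrite | github.com/10639780/proti | dee.py | possible_score_func
-- ===== SOURCE A (Python) =====
-- def possible_score_func(nodes_to_visit):
--     """Calculates the best score the remaining bit of the protien can acquire."""
--
--     possible_score = 0
--
--     # an H atom can get at most -2 and a C atom at best -10
--     for i, n in enumerate(nodes_to_visit):
--
--         if i == len(nodes_to_visit) - 1:
--             if n == 'H':
--                 possible_score += -3
--             if n == 'C':
--                 possible_score += -15
--             continue
--
--         if n == 'H':
--              possible_score += -2
--         if n == 'C':
--             possible_score += -10
--
--     return possible_score
-- ===== SOURCE B (Python) =====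
-- def possible_score_func(nodes_to_visit):
--     """Calculates the best score the remaining bit of the protien can acquire."""
--     score = sum(-2 if n == 'H' else -10 if n == 'C' else 0 for n in nodes_to_visit)
--     if nodes_to_visit:
--         last = nodes_to_visit[-1]
--         if last == 'H':
--             score += -1
--         elif last == 'C':
--             score += -5
--     return score
-- ===== Notes on version B (the rewrite author's own statement) =====
-- stated objective: simpler
-- what changed: Replaces the per-iteration last-index check with one uniform sum over all elements plus a single tail correction for the last element (-3 = -2 + -1, -15 = -10 + -5).
import Mathlib
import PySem

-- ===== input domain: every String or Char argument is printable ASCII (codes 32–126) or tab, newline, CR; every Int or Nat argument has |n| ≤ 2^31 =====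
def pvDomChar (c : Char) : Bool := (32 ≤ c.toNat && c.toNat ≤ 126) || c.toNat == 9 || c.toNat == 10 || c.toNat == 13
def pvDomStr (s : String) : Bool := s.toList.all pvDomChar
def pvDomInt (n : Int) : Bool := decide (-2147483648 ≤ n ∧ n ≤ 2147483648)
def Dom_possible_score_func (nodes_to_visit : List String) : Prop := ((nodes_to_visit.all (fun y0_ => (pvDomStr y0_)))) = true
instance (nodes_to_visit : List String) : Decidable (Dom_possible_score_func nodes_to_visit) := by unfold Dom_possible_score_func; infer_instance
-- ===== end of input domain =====

-- B replaces A's per-iteration last-index check with one uniform per-element sum plus a single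
-- tail correction for the last element; objective: simpler.

-- ===== PORT A =====
-- literal port of A's enumerate loop with the i == len-1 special case
def possible_score_func (nodes_to_visit : List String) : Int :=
  (PySem.List.enumerate nodes_to_visit).foldl
    (fun possible_score p =>
      if p.1 = (nodes_to_visit.length : Int) - 1 then
        (if p.2 = "H" then possible_score + (-3) else possible_score)
          + (if p.2 = "C" then -15 else 0)
      else
        (if p.2 = "H" then possible_score + (-2) else possible_score)
          + (if p.2 = "C" then -10 else 0))
    0

-- ===== PORT B =====
-- per-element base contribution
def pvBase (n : String) : Int := if n = "H" then -2 else if n = "C" then -10 else 0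

def possible_score_func_alt (nodes_to_visit : List String) : Int :=
  (nodes_to_visit.map pvBase).sum +
    match nodes_to_visit.getLast? with
    | some last => if last = "H" then -1 else if last = "C" then -5 else 0
    | none => 0

-- ===== PRECONDITION & SPEC =====
def Spec_possible_score_func (nodes_to_visit : List String) (out : Int) : Prop := out = possible_score_func_alt nodes_to_visit
instance (nodes_to_visit : List String) (out : Int) : Decidable (Spec_possible_score_func nodes_to_visit out) := by unfold Spec_possible_score_func; infer_instance

-- ===== CLAIM (what is proved, stated in full; the proofs are below) =====
def Claim_equal_possible_score_func : Prop := ∀ (nodes_to_visit : List String), Dom_possible_score_func nodes_to_visit → Spec_possible_score_func nodes_to_visit (possible_score_func nodes_to_visit)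

-- ===== LEMMAS AND PROOFS =====

-- A's loop body as a function of the length bound m, for reasoning about the fold
def pvStepA (m : Int) (possible_score : Int) (p : Int × String) : Int :=
  if p.1 = m - 1 then
    (if p.2 = "H" then possible_score + (-3) else possible_score)
      + (if p.2 = "C" then -15 else 0)
  else
    (if p.2 = "H" then possible_score + (-2) else possible_score)
      + (if p.2 = "C" then -10 else 0)

-- On the non-last region (every index s + k < m - 1), A's fold adds exactly the base sum.
lemma pvFoldA_base (m : Int) :
    ∀ (xs : List String) (s acc : Int), s + xs.length ≤ m - 1 →
      (PySem.List.enumerate xs s).foldl (pvStepA m) acc = acc + (xs.map pvBase).sum := by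
  intro xs
  induction xs with
  | nil => intro s acc _; simp [PySem.List.enumerate_nil]
  | cons x xs ih =>
      intro s acc h
      rw [PySem.List.enumerate_cons, List.foldl_cons,
          ih (s + 1) _ (by simp at h ⊢; omega)]
      have hs : s ≠ m - 1 := by simp at h; omega
      simp [pvStepA, hs, pvBase]
      split_ifs <;> simp_all <;> ring

-- the last step of A's fold is the base contribution plus the tail correction
lemma pvStepA_last (m acc : Int) (x : String) :
    pvStepA m acc (m - 1, x) =
      acc + pvBase x + (if x = "H" then -1 else if x = "C" then -5 else 0) := by
  simp [pvStepA, pvBase]; split_ifs <;> simp_all <;> ring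

theorem pvEq (l : List String) : possible_score_func l = possible_score_func_alt l := by
  induction l using List.reverseRecOn with
  | nil => simp [possible_score_func, possible_score_func_alt, PySem.List.enumerate_nil]
  | append_singleton xs x _ =>
      show (PySem.List.enumerate (xs ++ [x]) 0).foldl (pvStepA ((xs ++ [x]).length : Int)) 0
            = possible_score_func_alt (xs ++ [x])
      rw [PySem.List.enumerate_append, List.foldl_append,
          pvFoldA_base _ xs 0 0 (by simp),
          PySem.List.enumerate_cons, PySem.List.enumerate_nil]
      simp only [List.foldl_cons, List.foldl_nil]
      have : (0 : Int) + (xs.length : Int) = ((xs ++ [x]).length : Int) - 1 := by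
        push_cast [List.length_append]; simp
      rw [this, pvStepA_last]
      simp [possible_score_func_alt, pvBase]

-- ===== VERDICT (by name: the statement is the Claim_ definition above) =====
theorem possible_score_func_spec : Claim_equal_possible_score_func := by
  intro l _
  show possible_score_func l = possible_score_func_alt l
  exact pvEq l
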